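-- pv_equiv track=rewrite | github.com/marieeliselat/McGill | Comp 202/Assignment 2/game.py | calculate_round_points
-- ===== SOURCE A (Python) =====
-- def calculate_round_points(hand):
--     """
--     (list) -> int
--     Returns the point value of that hand
--     >>> calculate_round_points([1, 2, 3, 4])
--     8
--     >>> calculate_round_points([49, 50, 51, 52])
--     4
--     """
--
--     a = 0
--
--     for y in hand:
--         if y in range(1,5): #2s
--             a += 2
--         elif y in range(5,9):#3s
--             a += 3
--         elif y in range(9,13):#4s
--             a += 4
--         elif y in range(13,17): #5s
--             a += 5
--         elif y in range(17,21):#6s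
--             a += 6
--         elif y in range(21,25):#7s
--             a += 7
--         elif y in range(25,29):#8s
--             a += 8
--         elif y in range(29,33):#9s
--             a += 9
--         elif y in range(33,49):#Cards of 10s, Jack, King, Queen
--             a += 10
--         elif y in range(49,53):#ACE
--             a += 1
--
--     return a
-- ===== SOURCE B (Python) =====
-- def calculate_round_points(hand):
--     # Build the card-index -> points table once, then one lookup per card.
--     table = {}
--     for y in range(1, 49):
--         table[y] = min((y - 1) // 4 + 2, 10)
--     for y in range(49, 53):
--         table[y] = 1
--     return sum(table.get(y, 0) for y in hand)
-- ===== Notes on version B (the rewrite author's own statement) =====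
-- stated objective: simpler
-- what changed: Replaces A's ten-branch elif ladder (each branch a linear 'y in range(...)' membership scan) evaluated per card by a card-index-to-points dict built once before a single lookup-and-sum pass over the hand.
import Mathlib
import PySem

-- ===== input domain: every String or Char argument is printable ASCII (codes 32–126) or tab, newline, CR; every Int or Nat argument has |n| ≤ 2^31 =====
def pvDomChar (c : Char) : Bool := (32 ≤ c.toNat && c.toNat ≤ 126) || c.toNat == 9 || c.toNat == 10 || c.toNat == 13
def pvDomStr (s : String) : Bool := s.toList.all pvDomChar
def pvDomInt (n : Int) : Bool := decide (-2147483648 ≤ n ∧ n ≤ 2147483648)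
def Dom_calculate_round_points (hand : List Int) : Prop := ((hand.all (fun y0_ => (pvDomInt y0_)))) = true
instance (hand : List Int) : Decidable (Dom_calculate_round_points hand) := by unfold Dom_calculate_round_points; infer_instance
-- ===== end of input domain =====

-- B replaces A's ten-branch elif ladder by a points table built once (dict from card index to
-- points) followed by a single lookup-and-sum pass (objective: simpler).


-- ===== PORT A =====
-- 'y in range(lo, hi)' is ported as its bounds test lo ≤ y < hi (exact: PySem.List.mem_pyRange_one).
def calculate_round_points (hand : List Int) : Int :=
  hand.foldl (fun a y =>
    if 1 ≤ y ∧ y < 5 then a + 2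
    else if 5 ≤ y ∧ y < 9 then a + 3
    else if 9 ≤ y ∧ y < 13 then a + 4
    else if 13 ≤ y ∧ y < 17 then a + 5
    else if 17 ≤ y ∧ y < 21 then a + 6
    else if 21 ≤ y ∧ y < 25 then a + 7
    else if 25 ≤ y ∧ y < 29 then a + 8
    else if 29 ≤ y ∧ y < 33 then a + 9
    else if 33 ≤ y ∧ y < 49 then a + 10
    else if 49 ≤ y ∧ y < 53 then a + 1
    else a) 0

-- ===== PORT B =====
-- the points table: 1–48 ↦ min((y-1)//4 + 2, 10), 49–52 ↦ 1
def pvTable : PySem.Dict Int Int :=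
  let t := (PySem.List.pyRange 1 49 1).foldl
    (fun d y => d.insert y (min (PySem.Int.floordiv (y - 1) 4 + 2) 10)) PySem.Dict.empty
  (PySem.List.pyRange 49 53 1).foldl (fun d y => d.insert y 1) t

def calculate_round_points_alt (hand : List Int) : Int :=
  (hand.map (fun y => pvTable.getD y 0)).sum

-- ===== PRECONDITION & SPEC =====
def Spec_calculate_round_points (hand : List Int) (out : Int) : Prop := out = calculate_round_points_alt hand
instance (hand : List Int) (out : Int) : Decidable (Spec_calculate_round_points hand out) := by unfold Spec_calculate_round_points; infer_instance

-- ===== CLAIM (what is proved, stated in full; the proofs are below) =====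
def Claim_equal_calculate_round_points : Prop := ∀ (hand : List Int), Dom_calculate_round_points hand → Spec_calculate_round_points hand (calculate_round_points hand)

-- ===== LEMMAS AND PROOFS =====

-- A's per-card contribution, as a function
def pvStepA (y : Int) : Int :=
  if 1 ≤ y ∧ y < 5 then 2
  else if 5 ≤ y ∧ y < 9 then 3
  else if 9 ≤ y ∧ y < 13 then 4
  else if 13 ≤ y ∧ y < 17 then 5
  else if 17 ≤ y ∧ y < 21 then 6
  else if 21 ≤ y ∧ y < 25 then 7
  else if 25 ≤ y ∧ y < 29 then 8
  else if 29 ≤ y ∧ y < 33 then 9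
  else if 33 ≤ y ∧ y < 49 then 10
  else if 49 ≤ y ∧ y < 53 then 1
  else 0

set_option maxHeartbeats 2000000 in
lemma pvLadder_eq (a y : Int) :
    (if 1 ≤ y ∧ y < 5 then a + 2
      else if 5 ≤ y ∧ y < 9 then a + 3
      else if 9 ≤ y ∧ y < 13 then a + 4
      else if 13 ≤ y ∧ y < 17 then a + 5
      else if 17 ≤ y ∧ y < 21 then a + 6
      else if 21 ≤ y ∧ y < 25 then a + 7
      else if 25 ≤ y ∧ y < 29 then a + 8
      else if 29 ≤ y ∧ y < 33 then a + 9
      else if 33 ≤ y ∧ y < 49 then a + 10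
      else if 49 ≤ y ∧ y < 53 then a + 1
      else a) = a + pvStepA y := by
  unfold pvStepA
  by_cases h1 : 1 ≤ y ∧ y < 5
  · simp [h1]
  simp only [if_neg h1]
  by_cases h2 : 5 ≤ y ∧ y < 9
  · simp [h2]
  simp only [if_neg h2]
  by_cases h3 : 9 ≤ y ∧ y < 13
  · simp [h3]
  simp only [if_neg h3]
  by_cases h4 : 13 ≤ y ∧ y < 17
  · simp [h4]
  simp only [if_neg h4]
  by_cases h5 : 17 ≤ y ∧ y < 21
  · simp [h5]
  simp only [if_neg h5]
  by_cases h6 : 21 ≤ y ∧ y < 25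
  · simp [h6]
  simp only [if_neg h6]
  by_cases h7 : 25 ≤ y ∧ y < 29
  · simp [h7]
  simp only [if_neg h7]
  by_cases h8 : 29 ≤ y ∧ y < 33
  · simp [h8]
  simp only [if_neg h8]
  by_cases h9 : 33 ≤ y ∧ y < 49
  · simp [h9]
  simp only [if_neg h9]
  by_cases h10 : 49 ≤ y ∧ y < 53
  · simp [h10]
  simp only [if_neg h10]
  ring

set_option maxHeartbeats 1000000 in
lemma pvFoldA_eq_sum (hand : List Int) (a : Int) :
    hand.foldl (fun a y =>
      if 1 ≤ y ∧ y < 5 then a + 2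
      else if 5 ≤ y ∧ y < 9 then a + 3
      else if 9 ≤ y ∧ y < 13 then a + 4
      else if 13 ≤ y ∧ y < 17 then a + 5
      else if 17 ≤ y ∧ y < 21 then a + 6
      else if 21 ≤ y ∧ y < 25 then a + 7
      else if 25 ≤ y ∧ y < 29 then a + 8
      else if 29 ≤ y ∧ y < 33 then a + 9
      else if 33 ≤ y ∧ y < 49 then a + 10
      else if 49 ≤ y ∧ y < 53 then a + 1
      else a) a = a + (hand.map pvStepA).sum := by
  induction hand generalizing a with
  | nil => simp
  | cons y ys ih =>
    simp only [List.foldl_cons, List.map_cons, List.sum_cons]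
    rw [pvLadder_eq, ih]
    ring

set_option maxRecDepth 20000 in
set_option maxHeartbeats 2000000 in
lemma pvStep_eq_table (y : Int) : pvStepA y = pvTable.getD y 0 := by
  by_cases h : 1 ≤ y ∧ y ≤ 52
  · obtain ⟨h1, h2⟩ := h
    interval_cases y <;> decide
  · have hz : pvStepA y = 0 := by
      unfold pvStepA
      rw [if_neg (by omega), if_neg (by omega), if_neg (by omega), if_neg (by omega),
        if_neg (by omega), if_neg (by omega), if_neg (by omega), if_neg (by omega),
        if_neg (by omega), if_neg (by omega)]
    have hk : y ∉ pvTable.keys := by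
      have hkeys : pvTable.keys = PySem.List.pyRange 1 53 1 := by decide
      rw [hkeys, PySem.List.mem_pyRange_one]
      omega
    rw [hz, PySem.Dict.getD_eq_get?_getD,
      (PySem.Dict.get?_eq_none_iff_not_mem_keys _ _).mpr hk]
    rfl

-- ===== VERDICT (by name: the statement is the Claim_ definition above) =====
theorem calculate_round_points_spec : Claim_equal_calculate_round_points := by
  intro hand _
  show _ = _
  unfold calculate_round_points calculate_round_points_alt
  rw [pvFoldA_eq_sum]
  simp [funext pvStep_eq_table]
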